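-- pv_equiv track=rewrite | github.com/mathorlee/leetcode-clt | ac/number-of-ways-to-paint-n-3-grid.py | xx
-- ===== SOURCE A (Python) =====
-- def xx(n: int) -> int:
--     # begin
--     from collections import defaultdict
--     import itertools
--
--     all_states = [_ for _ in itertools.product(range(3), repeat=3) if _[0] != _[1] and _[1] != _[2]]
--     m = len(all_states)
--     if n == 1:
--         return m
--
--     # init state transfer, store into edge_d
--     edge_d = defaultdict(list)
--     for i, j in itertools.combinations(range(m), 2):
--         if all(all_states[i][k] != all_states[j][k] for k in range(3)):
--             edge_d[i].append(j)
--             edge_d[j].append(i)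
--
--     M = 10**9 + 7
--     arr = [1] * m
--     for _ in range(n - 1):
--         new_arr = [0] * m
--         for i in range(m):
--             for j in edge_d[i]:
--                 new_arr[j] = (new_arr[j] + arr[i]) % M
--         arr = new_arr
--     return sum(arr) % M
-- ===== SOURCE B (Python) =====
-- def xx(n: int) -> int:
--     # Collapse the 12 row-colorings by symmetry into two classes:
--     # a = colorings whose last row is ABA-type, b = ... ABC-type.
--     # A compatible next row gives the linear recurrence a' = 3a+2b, b' = 2a+2b.
--     M = 10**9 + 7
--     a = b = 6
--     for _ in range(n - 1):
--         a, b = (3 * a + 2 * b) % M, (2 * a + 2 * b) % M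
--     return (a + b) % M
-- ===== Notes on version B (the rewrite author's own statement) =====
-- stated objective: faster
-- what changed: Replaces the explicitly built twelve-state compatibility graph and per-state vector iteration by the symmetry-collapsed two-variable recurrence a'=3a+2b, b'=2a+2b on the counts of ABA- and ABC-type rows.
import Mathlib
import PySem

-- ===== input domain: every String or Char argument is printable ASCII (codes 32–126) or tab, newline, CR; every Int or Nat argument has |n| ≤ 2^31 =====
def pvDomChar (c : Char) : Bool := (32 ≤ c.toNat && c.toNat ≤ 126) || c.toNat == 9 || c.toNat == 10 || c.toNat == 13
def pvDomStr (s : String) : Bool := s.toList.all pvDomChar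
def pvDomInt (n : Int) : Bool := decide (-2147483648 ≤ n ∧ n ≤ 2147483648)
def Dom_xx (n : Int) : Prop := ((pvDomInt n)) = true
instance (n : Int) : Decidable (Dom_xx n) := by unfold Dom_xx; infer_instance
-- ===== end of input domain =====

-- B replaces A's explicit 12-state compatibility graph and 12-element vector iteration by the
-- symmetry-collapsed two-variable recurrence a' = 3a+2b, b' = 2a+2b (faster by a constant factor per step).

-- ===== PORT A =====
-- all_states = [_ for _ in itertools.product(range(3), repeat=3) if _[0] != _[1] and _[1] != _[2]]
def allStatesA : List (Int × Int × Int) :=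
  (((PySem.List.pyRange 0 3 1).flatMap fun a =>
    (PySem.List.pyRange 0 3 1).flatMap fun b =>
      (PySem.List.pyRange 0 3 1).map fun c => (a, b, c))).filter
    (fun s => s.1 != s.2.1 && s.2.1 != s.2.2)

-- m = len(all_states); kept as Nat because it is only used as a list length / index bound
def mA : Nat := allStatesA.length

-- all_states[i][k] for k = 0,1,2
def stateGetA (s : Int × Int × Int) (k : Nat) : Int :=
  match k with
  | 0 => s.1
  | 1 => s.2.1
  | _ => s.2.2

-- itertools.combinations(range(m), 2); indices are provably-nonnegative list positions, kept as Nat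
def combosA : List (Nat × Nat) :=
  (List.range mA).flatMap fun i => ((List.range mA).drop (i + 1)).map fun j => (i, j)

-- edge_d = defaultdict(list); edge_d[i].append(j); edge_d[j].append(i)
def edgeDA : PySem.Dict Nat (List Nat) :=
  combosA.foldl (fun d p =>
    if (List.range 3).all (fun k =>
        stateGetA (allStatesA.getD p.1 (0, 0, 0)) k != stateGetA (allStatesA.getD p.2 (0, 0, 0)) k) then
      (d.modify p.1 [] (· ++ [p.2])).modify p.2 [] (· ++ [p.1])
    else d) PySem.Dict.empty

-- one iteration of 'for _ in range(n-1)': new_arr = [0]*m; for i in range(m): for j in edge_d[i]: ...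
def stepA (arr : List Int) : List Int :=
  (List.range mA).foldl (fun na i =>
      (edgeDA.getD i []).foldl (fun na j =>
          na.set j (PySem.Int.mod (na.getD j 0 + arr.getD i 0) 1000000007)) na)
    (List.replicate mA 0)

def xx (n : Int) : Int :=
  if n = 1 then PySem.List.len allStatesA
  else PySem.Int.mod ((stepA^[(n - 1).toNat] (List.replicate mA 1)).foldl (· + ·) 0) 1000000007

-- ===== PORT B =====
-- a, b = (3*a+2*b) % M, (2*a+2*b) % M
def stepB (p : Int × Int) : Int × Int :=
  (PySem.Int.mod (3 * p.1 + 2 * p.2) 1000000007, PySem.Int.mod (2 * p.1 + 2 * p.2) 1000000007)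

def xx_alt (n : Int) : Int :=
  let p := stepB^[(n - 1).toNat] (6, 6)
  PySem.Int.mod (p.1 + p.2) 1000000007

-- ===== PRECONDITION & SPEC =====
def Spec_xx (n : Int) (out : Int) : Prop := out = xx_alt n
instance (n : Int) (out : Int) : Decidable (Spec_xx n out) := by unfold Spec_xx; infer_instance

-- ===== CLAIM (what is proved, stated in full; the proofs are below) =====
def Claim_equal_xx : Prop := ∀ (n : Int), Dom_xx n → Spec_xx n (xx n)

-- ===== LEMMAS AND PROOFS =====

-- A's 12-vector stays symmetric: ABA-type states (indices 0,2,4,7,9,11) share one value α,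
-- ABC-type states share one value β.
def patternA (α β : Int) : List Int := [α, β, α, β, α, β, β, α, β, α, β, α]

theorem pvFoldl12 (f : List Int → Nat → List Int) (l0 l1 l2 l3 l4 l5 l6 l7 l8 l9 l10 l11 l12 : List Int)
    (h0 : f l0 0 = l1) (h1 : f l1 1 = l2) (h2 : f l2 2 = l3) (h3 : f l3 3 = l4) (h4 : f l4 4 = l5) (h5 : f l5 5 = l6) (h6 : f l6 6 = l7) (h7 : f l7 7 = l8) (h8 : f l8 8 = l9) (h9 : f l9 9 = l10) (h10 : f l10 10 = l11) (h11 : f l11 11 = l12) :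
    List.foldl f l0 [0, 1, 2, 3, 4, 5, 6, 7, 8, 9, 10, 11] = l12 := by
  rw [List.foldl_cons, h0, List.foldl_cons, h1, List.foldl_cons, h2, List.foldl_cons, h3, List.foldl_cons, h4, List.foldl_cons, h5, List.foldl_cons, h6, List.foldl_cons, h7, List.foldl_cons, h8, List.foldl_cons, h9, List.foldl_cons, h10, List.foldl_cons, h11, List.foldl_nil]

set_option maxRecDepth 8000 in
theorem stepA_pattern (α β : Int) :
    stepA (patternA α β) =
      patternA (PySem.Int.mod (3 * α + 2 * β) 1000000007)
               (PySem.Int.mod (2 * α + 2 * β) 1000000007) := by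
  have hm : mA = 12 := by decide
  have he : edgeDA = PySem.Dict.mk [(0,[4, 5, 7, 8, 9]), (4,[0, 1, 2, 10, 11]), (5,[0, 2, 3, 10]), (7,[0, 1, 9, 10, 11]), (8,[0, 1, 2, 6]), (9,[0, 2, 3, 6, 7]), (1,[4, 6, 7, 8]), (6,[1, 8, 9, 11]), (2,[4, 5, 8, 9, 11]), (11,[2, 3, 4, 6, 7]), (3,[5, 9, 10, 11]), (10,[3, 4, 5, 7])] := by decide
  have hr : List.range 12 = [0, 1, 2, 3, 4, 5, 6, 7, 8, 9, 10, 11] := by decide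
  simp only [stepA, hm, he, hr]
  rw [pvFoldl12 _ (List.replicate 12 0)
      ([(0 : Int), (0 : Int), (0 : Int), (0 : Int), PySem.Int.mod ((0 : Int) + α) 1000000007, PySem.Int.mod ((0 : Int) + α) 1000000007, (0 : Int), PySem.Int.mod ((0 : Int) + α) 1000000007, PySem.Int.mod ((0 : Int) + α) 1000000007, PySem.Int.mod ((0 : Int) + α) 1000000007, (0 : Int), (0 : Int)])
      ([(0 : Int), (0 : Int), (0 : Int), (0 : Int), PySem.Int.mod (PySem.Int.mod ((0 : Int) + α) 1000000007 + β) 1000000007, PySem.Int.mod ((0 : Int) + α) 1000000007, PySem.Int.mod ((0 : Int) + β) 1000000007, PySem.Int.mod (PySem.Int.mod ((0 : Int) + α) 1000000007 + β) 1000000007, PySem.Int.mod (PySem.Int.mod ((0 : Int) + α) 1000000007 + β) 1000000007, PySem.Int.mod ((0 : Int) + α) 1000000007, (0 : Int), (0 : Int)])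
      ([(0 : Int), (0 : Int), (0 : Int), (0 : Int), PySem.Int.mod (PySem.Int.mod (PySem.Int.mod ((0 : Int) + α) 1000000007 + β) 1000000007 + α) 1000000007, PySem.Int.mod (PySem.Int.mod ((0 : Int) + α) 1000000007 + α) 1000000007, PySem.Int.mod ((0 : Int) + β) 1000000007, PySem.Int.mod (PySem.Int.mod ((0 : Int) + α) 1000000007 + β) 1000000007, PySem.Int.mod (PySem.Int.mod (PySem.Int.mod ((0 : Int) + α) 1000000007 + β) 1000000007 + α) 1000000007, PySem.Int.mod (PySem.Int.mod ((0 : Int) + α) 1000000007 + α) 1000000007, (0 : Int), PySem.Int.mod ((0 : Int) + α) 1000000007])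
      ([(0 : Int), (0 : Int), (0 : Int), (0 : Int), PySem.Int.mod (PySem.Int.mod (PySem.Int.mod ((0 : Int) + α) 1000000007 + β) 1000000007 + α) 1000000007, PySem.Int.mod (PySem.Int.mod (PySem.Int.mod ((0 : Int) + α) 1000000007 + α) 1000000007 + β) 1000000007, PySem.Int.mod ((0 : Int) + β) 1000000007, PySem.Int.mod (PySem.Int.mod ((0 : Int) + α) 1000000007 + β) 1000000007, PySem.Int.mod (PySem.Int.mod (PySem.Int.mod ((0 : Int) + α) 1000000007 + β) 1000000007 + α) 1000000007, PySem.Int.mod (PySem.Int.mod (PySem.Int.mod ((0 : Int) + α) 1000000007 + α) 1000000007 + β) 1000000007, PySem.Int.mod ((0 : Int) + β) 1000000007, PySem.Int.mod (PySem.Int.mod ((0 : Int) + α) 1000000007 + β) 1000000007])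
      ([PySem.Int.mod ((0 : Int) + α) 1000000007, PySem.Int.mod ((0 : Int) + α) 1000000007, PySem.Int.mod ((0 : Int) + α) 1000000007, (0 : Int), PySem.Int.mod (PySem.Int.mod (PySem.Int.mod ((0 : Int) + α) 1000000007 + β) 1000000007 + α) 1000000007, PySem.Int.mod (PySem.Int.mod (PySem.Int.mod ((0 : Int) + α) 1000000007 + α) 1000000007 + β) 1000000007, PySem.Int.mod ((0 : Int) + β) 1000000007, PySem.Int.mod (PySem.Int.mod ((0 : Int) + α) 1000000007 + β) 1000000007, PySem.Int.mod (PySem.Int.mod (PySem.Int.mod ((0 : Int) + α) 1000000007 + β) 1000000007 + α) 1000000007, PySem.Int.mod (PySem.Int.mod (PySem.Int.mod ((0 : Int) + α) 1000000007 + α) 1000000007 + β) 1000000007, PySem.Int.mod (PySem.Int.mod ((0 : Int) + β) 1000000007 + α) 1000000007, PySem.Int.mod (PySem.Int.mod (PySem.Int.mod ((0 : Int) + α) 1000000007 + β) 1000000007 + α) 1000000007])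
      ([PySem.Int.mod (PySem.Int.mod ((0 : Int) + α) 1000000007 + β) 1000000007, PySem.Int.mod ((0 : Int) + α) 1000000007, PySem.Int.mod (PySem.Int.mod ((0 : Int) + α) 1000000007 + β) 1000000007, PySem.Int.mod ((0 : Int) + β) 1000000007, PySem.Int.mod (PySem.Int.mod (PySem.Int.mod ((0 : Int) + α) 1000000007 + β) 1000000007 + α) 1000000007, PySem.Int.mod (PySem.Int.mod (PySem.Int.mod ((0 : Int) + α) 1000000007 + α) 1000000007 + β) 1000000007, PySem.Int.mod ((0 : Int) + β) 1000000007, PySem.Int.mod (PySem.Int.mod ((0 : Int) + α) 1000000007 + β) 1000000007, PySem.Int.mod (PySem.Int.mod (PySem.Int.mod ((0 : Int) + α) 1000000007 + β) 1000000007 + α) 1000000007, PySem.Int.mod (PySem.Int.mod (PySem.Int.mod ((0 : Int) + α) 1000000007 + α) 1000000007 + β) 1000000007, PySem.Int.mod (PySem.Int.mod (PySem.Int.mod ((0 : Int) + β) 1000000007 + α) 1000000007 + β) 1000000007, PySem.Int.mod (PySem.Int.mod (PySem.Int.mod ((0 : Int) + α) 1000000007 + β) 1000000007 + α) 1000000007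])
      ([PySem.Int.mod (PySem.Int.mod ((0 : Int) + α) 1000000007 + β) 1000000007, PySem.Int.mod (PySem.Int.mod ((0 : Int) + α) 1000000007 + β) 1000000007, PySem.Int.mod (PySem.Int.mod ((0 : Int) + α) 1000000007 + β) 1000000007, PySem.Int.mod ((0 : Int) + β) 1000000007, PySem.Int.mod (PySem.Int.mod (PySem.Int.mod ((0 : Int) + α) 1000000007 + β) 1000000007 + α) 1000000007, PySem.Int.mod (PySem.Int.mod (PySem.Int.mod ((0 : Int) + α) 1000000007 + α) 1000000007 + β) 1000000007, PySem.Int.mod ((0 : Int) + β) 1000000007, PySem.Int.mod (PySem.Int.mod ((0 : Int) + α) 1000000007 + β) 1000000007, PySem.Int.mod (PySem.Int.mod (PySem.Int.mod (PySem.Int.mod ((0 : Int) + α) 1000000007 + β) 1000000007 + α) 1000000007 + β) 1000000007, PySem.Int.mod (PySem.Int.mod (PySem.Int.mod (PySem.Int.mod ((0 : Int) + α) 1000000007 + α) 1000000007 + β) 1000000007 + β) 1000000007, PySem.Int.mod (PySem.Int.mod (PySem.Int.mod ((0 : Int) + β) 1000000007 + α) 1000000007 + β) 1000000007, PySem.Int.mod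 (PySem.Int.mod (PySem.Int.mod (PySem.Int.mod ((0 : Int) + α) 1000000007 + β) 1000000007 + α) 1000000007 + β) 1000000007])
      ([PySem.Int.mod (PySem.Int.mod (PySem.Int.mod ((0 : Int) + α) 1000000007 + β) 1000000007 + α) 1000000007, PySem.Int.mod (PySem.Int.mod (PySem.Int.mod ((0 : Int) + α) 1000000007 + β) 1000000007 + α) 1000000007, PySem.Int.mod (PySem.Int.mod ((0 : Int) + α) 1000000007 + β) 1000000007, PySem.Int.mod ((0 : Int) + β) 1000000007, PySem.Int.mod (PySem.Int.mod (PySem.Int.mod ((0 : Int) + α) 1000000007 + β) 1000000007 + α) 1000000007, PySem.Int.mod (PySem.Int.mod (PySem.Int.mod ((0 : Int) + α) 1000000007 + α) 1000000007 + β) 1000000007, PySem.Int.mod ((0 : Int) + β) 1000000007, PySem.Int.mod (PySem.Int.mod ((0 : Int) + α) 1000000007 + β) 1000000007, PySem.Int.mod (PySem.Int.mod (PySem.Int.mod (PySem.Int.mod ((0 : Int) + α) 1000000007 + β) 1000000007 + α) 1000000007 + β) 1000000007, PySem.Int.mod (PySem.Int.mod (PySem.Int.mod (PySem.Int.mod (PySem.Int.mod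 ((0 : Int) + α) 1000000007 + α) 1000000007 + β) 1000000007 + β) 1000000007 + α) 1000000007, PySem.Int.mod (PySem.Int.mod (PySem.Int.mod (PySem.Int.mod ((0 : Int) + β) 1000000007 + α) 1000000007 + β) 1000000007 + α) 1000000007, PySem.Int.mod (PySem.Int.mod (PySem.Int.mod (PySem.Int.mod (PySem.Int.mod ((0 : Int) + α) 1000000007 + β) 1000000007 + α) 1000000007 + β) 1000000007 + α) 1000000007])
      ([PySem.Int.mod (PySem.Int.mod (PySem.Int.mod (PySem.Int.mod ((0 : Int) + α) 1000000007 + β) 1000000007 + α) 1000000007 + β) 1000000007, PySem.Int.mod (PySem.Int.mod (PySem.Int.mod (PySem.Int.mod ((0 : Int) + α) 1000000007 + β) 1000000007 + α) 1000000007 + β) 1000000007, PySem.Int.mod (PySem.Int.mod (PySem.Int.mod ((0 : Int) + α) 1000000007 + β) 1000000007 + β) 1000000007, PySem.Int.mod ((0 : Int) + β) 1000000007, PySem.Int.mod (PySem.Int.mod (PySem.Int.mod ((0 : Int) + α) 1000000007 + β) 1000000007 + α) 1000000007, PySem.Int.mod (PySem.Int.mod (PySem.Int.mod ((0 : Int)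 + α) 1000000007 + α) 1000000007 + β) 1000000007, PySem.Int.mod (PySem.Int.mod ((0 : Int) + β) 1000000007 + β) 1000000007, PySem.Int.mod (PySem.Int.mod ((0 : Int) + α) 1000000007 + β) 1000000007, PySem.Int.mod (PySem.Int.mod (PySem.Int.mod (PySem.Int.mod ((0 : Int) + α) 1000000007 + β) 1000000007 + α) 1000000007 + β) 1000000007, PySem.Int.mod (PySem.Int.mod (PySem.Int.mod (PySem.Int.mod (PySem.Int.mod ((0 : Int) + α) 1000000007 + α) 1000000007 + β) 1000000007 + β) 1000000007 + α) 1000000007, PySem.Int.mod (PySem.Int.mod (PySem.Int.mod (PySem.Int.mod ((0 : Int) + β) 1000000007 + α) 1000000007 + β) 1000000007 + α) 1000000007, PySem.Int.mod (PySem.Int.mod (PySem.Int.mod (PySem.Int.mod (PySem.Int.mod ((0 : Int) + α) 1000000007 + β) 1000000007 + α) 1000000007 + β) 1000000007 + α) 1000000007])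
      ([PySem.Int.mod (PySem.Int.mod (PySem.Int.mod (PySem.Int.mod (PySem.Int.mod ((0 : Int) + α) 1000000007 + β) 1000000007 + α) 1000000007 + β) 1000000007 + α) 1000000007, PySem.Int.mod (PySem.Int.mod (PySem.Int.mod (PySem.Int.mod ((0 : Int) + α) 1000000007 + β) 1000000007 + α) 1000000007 + β) 1000000007, PySem.Int.mod (PySem.Int.mod (PySem.Int.mod (PySem.Int.mod ((0 : Int) + α) 1000000007 + β) 1000000007 + β) 1000000007 + α) 1000000007, PySem.Int.mod (PySem.Int.mod ((0 : Int) + β) 1000000007 + α) 1000000007, PySem.Int.mod (PySem.Int.mod (PySem.Int.mod ((0 : Int) + α) 1000000007 + β) 1000000007 + α) 1000000007, PySem.Int.mod (PySem.Int.mod (PySem.Int.mod ((0 : Int) + α) 1000000007 + α) 1000000007 + β) 1000000007, PySem.Int.mod (PySem.Int.mod (PySem.Int.mod ((0 : Int) + β) 1000000007 + β) 1000000007 + α) 1000000007, PySem.Int.mod (PySem.Int.mod (PySem.Int.mod ((0 : Int) + α) 1000000007 + β) 1000000007 + α) 1000000007, PySem.Int.mod (PySem.Int.mod (PySem.Int.mod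 (PySem.Int.mod ((0 : Int) + α) 1000000007 + β) 1000000007 + α) 1000000007 + β) 1000000007, PySem.Int.mod (PySem.Int.mod (PySem.Int.mod (PySem.Int.mod (PySem.Int.mod ((0 : Int) + α) 1000000007 + α) 1000000007 + β) 1000000007 + β) 1000000007 + α) 1000000007, PySem.Int.mod (PySem.Int.mod (PySem.Int.mod (PySem.Int.mod ((0 : Int) + β) 1000000007 + α) 1000000007 + β) 1000000007 + α) 1000000007, PySem.Int.mod (PySem.Int.mod (PySem.Int.mod (PySem.Int.mod (PySem.Int.mod ((0 : Int) + α) 1000000007 + β) 1000000007 + α) 1000000007 + β) 1000000007 + α) 1000000007])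
      ([PySem.Int.mod (PySem.Int.mod (PySem.Int.mod (PySem.Int.mod (PySem.Int.mod ((0 : Int) + α) 1000000007 + β) 1000000007 + α) 1000000007 + β) 1000000007 + α) 1000000007, PySem.Int.mod (PySem.Int.mod (PySem.Int.mod (PySem.Int.mod ((0 : Int) + α) 1000000007 + β) 1000000007 + α) 1000000007 + β) 1000000007, PySem.Int.mod (PySem.Int.mod (PySem.Int.mod (PySem.Int.mod ((0 : Int) + α) 1000000007 + β) 1000000007 + β) 1000000007 + α) 1000000007, PySem.Int.mod (PySem.Int.mod (PySem.Int.mod ((0 : Int) + β) 1000000007 + α) 1000000007 + β) 1000000007, PySem.Int.mod (PySem.Int.mod (PySem.Int.mod (PySem.Int.mod ((0 : Int) + α) 1000000007 + β) 1000000007 + α) 1000000007 + β) 1000000007, PySem.Int.mod (PySem.Int.mod (PySem.Int.mod (PySem.Int.mod ((0 : Int) + α) 1000000007 + α) 1000000007 + β) 1000000007 + β) 1000000007, PySem.Int.mod (PySem.Int.mod (PySem.Int.mod ((0 : Int) + β) 1000000007 + β) 1000000007 + α) 1000000007, PySem.Int.mod (PySem.Int.mod (PySem.Int.mod (PySem.Int.mod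 ((0 : Int) + α) 1000000007 + β) 1000000007 + α) 1000000007 + β) 1000000007, PySem.Int.mod (PySem.Int.mod (PySem.Int.mod (PySem.Int.mod ((0 : Int) + α) 1000000007 + β) 1000000007 + α) 1000000007 + β) 1000000007, PySem.Int.mod (PySem.Int.mod (PySem.Int.mod (PySem.Int.mod (PySem.Int.mod ((0 : Int) + α) 1000000007 + α) 1000000007 + β) 1000000007 + β) 1000000007 + α) 1000000007, PySem.Int.mod (PySem.Int.mod (PySem.Int.mod (PySem.Int.mod ((0 : Int) + β) 1000000007 + α) 1000000007 + β) 1000000007 + α) 1000000007, PySem.Int.mod (PySem.Int.mod (PySem.Int.mod (PySem.Int.mod (PySem.Int.mod ((0 : Int) + α) 1000000007 + β) 1000000007 + α) 1000000007 + β) 1000000007 + α) 1000000007])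
      ([PySem.Int.mod (PySem.Int.mod (PySem.Int.mod (PySem.Int.mod (PySem.Int.mod ((0 : Int) + α) 1000000007 + β) 1000000007 + α) 1000000007 + β) 1000000007 + α) 1000000007, PySem.Int.mod (PySem.Int.mod (PySem.Int.mod (PySem.Int.mod ((0 : Int) + α) 1000000007 + β) 1000000007 + α) 1000000007 + β) 1000000007, PySem.Int.mod (PySem.Int.mod (PySem.Int.mod (PySem.Int.mod (PySem.Int.mod ((0 : Int) + α) 1000000007 + β) 1000000007 + β) 1000000007 + α) 1000000007 + α) 1000000007, PySem.Int.mod (PySem.Int.mod (PySem.Int.mod (PySem.Int.mod ((0 : Int) + β) 1000000007 + α) 1000000007 + β) 1000000007 + α) 1000000007, PySem.Int.mod (PySem.Int.mod (PySem.Int.mod (PySem.Int.mod (PySem.Int.mod ((0 : Int) + α) 1000000007 + β) 1000000007 + α) 1000000007 + β) 1000000007 + α) 1000000007, PySem.Int.mod (PySem.Int.mod (PySem.Int.mod (PySem.Int.mod ((0 : Int) + α) 1000000007 + α) 1000000007 + β) 1000000007 + β) 1000000007, PySem.Int.mod (PySem.Int.mod (PySem.Int.mod (PySem.Int.mod ((0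 : Int) + β) 1000000007 + β) 1000000007 + α) 1000000007 + α) 1000000007, PySem.Int.mod (PySem.Int.mod (PySem.Int.mod (PySem.Int.mod (PySem.Int.mod ((0 : Int) + α) 1000000007 + β) 1000000007 + α) 1000000007 + β) 1000000007 + α) 1000000007, PySem.Int.mod (PySem.Int.mod (PySem.Int.mod (PySem.Int.mod ((0 : Int) + α) 1000000007 + β) 1000000007 + α) 1000000007 + β) 1000000007, PySem.Int.mod (PySem.Int.mod (PySem.Int.mod (PySem.Int.mod (PySem.Int.mod ((0 : Int) + α) 1000000007 + α) 1000000007 + β) 1000000007 + β) 1000000007 + α) 1000000007, PySem.Int.mod (PySem.Int.mod (PySem.Int.mod (PySem.Int.mod ((0 : Int) + β) 1000000007 + α) 1000000007 + β) 1000000007 + α) 1000000007, PySem.Int.mod (PySem.Int.mod (PySem.Int.mod (PySem.Int.mod (PySem.Int.mod ((0 : Int) + α) 1000000007 + β) 1000000007 + α) 1000000007 + β) 1000000007 + α) 1000000007])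
      rfl rfl rfl rfl rfl rfl rfl rfl rfl rfl rfl rfl]
  simp only [patternA, List.cons.injEq, and_true,
    PySem.Int.mod_eq_emod_of_pos (by norm_num : (0 : Int) < 1000000007)]
  omega

theorem iter_pattern (k : Nat) :
    ∃ α β, stepA^[k] (List.replicate mA 1) = patternA α β ∧
      (stepB^[k] (6, 6)).1 = PySem.Int.mod (6 * α) 1000000007 ∧
      (stepB^[k] (6, 6)).2 = PySem.Int.mod (6 * β) 1000000007 := by
  induction k with
  | zero => exact ⟨1, 1, rfl, by decide, by decide⟩
  | succ k ih =>
    obtain ⟨α, β, hA, h1, h2⟩ := ih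
    refine ⟨PySem.Int.mod (3 * α + 2 * β) 1000000007,
            PySem.Int.mod (2 * α + 2 * β) 1000000007, ?_, ?_, ?_⟩
    · rw [Function.iterate_succ_apply', hA, stepA_pattern]
    · rw [Function.iterate_succ_apply']
      simp only [stepB, h1, h2,
        PySem.Int.mod_eq_emod_of_pos (by norm_num : (0 : Int) < 1000000007)]
      omega
    · rw [Function.iterate_succ_apply']
      simp only [stepB, h1, h2,
        PySem.Int.mod_eq_emod_of_pos (by norm_num : (0 : Int) < 1000000007)]
      omega

-- ===== VERDICT (by name: the statement is the Claim_ definition above) =====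
theorem xx_spec : Claim_equal_xx := by
  unfold Claim_equal_xx
  intro n _
  unfold Spec_xx
  by_cases h1 : n = 1
  · subst h1; decide
  · obtain ⟨α, β, hA, hb1, hb2⟩ := iter_pattern (n - 1).toNat
    simp only [xx, xx_alt, if_neg h1, hA, hb1, hb2, patternA, List.foldl,
      PySem.Int.mod_eq_emod_of_pos (by norm_num : (0 : Int) < 1000000007)]
    omega
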